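-- pv_equiv track=rewrite | github.com/material-lab-io/X | functions/generators/style_aware_generator.py | apply_formatting
-- ===== SOURCE A (Python) =====
-- def apply_formatting(text):
--     """Apply style guide formatting rules"""
--     # Add line breaks for readability
--     sentences = text.split('. ')
--     formatted = []
--
--     current_para = []
--     for sentence in sentences:
--         current_para.append(sentence)
--         if len(current_para) >= 2:  # Max 2 sentences per paragraph
--             formatted.append('. '.join(current_para) + '.')
--             formatted.append('')  # Empty line for whitespace
--             current_para = []
--
--     if current_para:
--         formatted.append('. '.join(current_para) + '.')
--
--     return '\n'.join(formatted).strip()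
-- ===== SOURCE B (Python) =====
-- def _pairs(sentences):
--     """Recursive chunking: first two sentences become a paragraph, recurse on the rest."""
--     if len(sentences) > 2:
--         return ['. '.join(sentences[:2]) + '.'] + _pairs(sentences[2:])
--     return ['. '.join(sentences) + '.']
--
--
-- def apply_formatting(text):
--     """Apply style guide formatting rules"""
--     return '\n\n'.join(_pairs(text.split('. '))).strip()
-- ===== Notes on version B (the rewrite author's own statement) =====
-- stated objective: simpler
-- what changed: Replaces the streaming accumulator loop with its blank-line sentinel entries and final flush by recursive two-sentence chunking whose paragraphs are joined directly with double newlines.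
import Mathlib
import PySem

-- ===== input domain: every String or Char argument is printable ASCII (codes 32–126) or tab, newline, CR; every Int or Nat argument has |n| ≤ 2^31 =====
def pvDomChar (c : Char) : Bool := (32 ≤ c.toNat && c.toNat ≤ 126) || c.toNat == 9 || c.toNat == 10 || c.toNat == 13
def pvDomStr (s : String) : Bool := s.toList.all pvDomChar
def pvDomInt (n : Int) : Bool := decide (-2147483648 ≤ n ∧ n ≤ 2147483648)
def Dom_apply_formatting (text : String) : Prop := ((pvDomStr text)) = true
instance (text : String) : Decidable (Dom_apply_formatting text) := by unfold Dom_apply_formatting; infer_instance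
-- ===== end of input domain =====

-- B replaces A's streaming accumulator loop (with blank-line sentinel entries and a final flush)
-- by recursive two-sentence chunking joined with double newlines; objective: simpler.

-- ===== PORT A =====
-- loop body of A's 'for sentence in sentences' (state = (formatted, current_para))
def stepA (st : List (List Char) × List (List Char)) (s : List Char) :
    List (List Char) × List (List Char) :=
  let cur := st.2 ++ [s]
  if 2 ≤ cur.length then
    (st.1 ++ [PySem.Chars.join ['.', ' '] cur ++ ['.'], []], [])
  else
    (st.1, cur)

-- A's trailing 'if current_para: formatted.append(...)'
def finishA (st : List (List Char) × List (List Char)) : List (List Char) :=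
  if st.2 = [] then st.1 else st.1 ++ [PySem.Chars.join ['.', ' '] st.2 ++ ['.']]

def apply_formatting (text : String) : String :=
  let sentences := PySem.Chars.splitOn text.toList ['.', ' ']
  let formatted := finishA (sentences.foldl stepA ([], []))
  String.ofList (PySem.Chars.strip (PySem.Chars.join ['\n'] formatted))

-- ===== PORT B =====
-- Source B's _pairs: first two sentences become a paragraph, recurse on the rest
def pairsChunks : List (List Char) → List (List Char)
  | a :: b :: c :: rest =>
      (PySem.Chars.join ['.', ' '] [a, b] ++ ['.']) :: pairsChunks (c :: rest)
  | ss => [PySem.Chars.join ['.', ' '] ss ++ ['.']]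

def apply_formatting_alt (text : String) : String :=
  String.ofList (PySem.Chars.strip (PySem.Chars.join ['\n', '\n']
    (pairsChunks (PySem.Chars.splitOn text.toList ['.', ' ']))))

-- ===== PRECONDITION & SPEC =====
def Spec_apply_formatting (text : String) (out : String) : Prop := out = apply_formatting_alt text
instance (text : String) (out : String) : Decidable (Spec_apply_formatting text out) := by unfold Spec_apply_formatting; infer_instance

-- ===== CLAIM (what is proved, stated in full; the proofs are below) =====
def Claim_equal_apply_formatting : Prop := ∀ (text : String), Dom_apply_formatting text → Spec_apply_formatting text (apply_formatting text)

-- ===== LEMMAS AND PROOFS =====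

-- A's formatted list as a function of the sentence list
def FA (ss : List (List Char)) : List (List Char) := finishA (ss.foldl stepA ([], []))

theorem splitOn_go_ne_nil (sep : List Char) :
    ∀ (fuel : Nat) (l cur : List Char) (acc : List (List Char)),
      PySem.Chars.splitOn.go sep fuel l cur acc ≠ [] := by
  intro fuel
  induction fuel with
  | zero => intro l cur acc; simp [PySem.Chars.splitOn.go]
  | succ n ih =>
      intro l cur acc
      cases l with
      | nil => simp [PySem.Chars.splitOn.go]
      | cons c rest =>
          simp only [PySem.Chars.splitOn.go]
          split
          · exact ih _ _ _
          · exact ih _ _ _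

theorem splitOn_ne_nil (s sep : List Char) : PySem.Chars.splitOn s sep ≠ [] := by
  unfold PySem.Chars.splitOn
  exact splitOn_go_ne_nil sep _ _ _ _

theorem foldl_stepA_acc (ss : List (List Char)) :
    ∀ (acc cur : List (List Char)),
      ss.foldl stepA (acc, cur) =
        (acc ++ (ss.foldl stepA ([], cur)).1, (ss.foldl stepA ([], cur)).2) := by
  induction ss with
  | nil => intro acc cur; simp
  | cons a ss ih =>
      intro acc cur
      simp only [List.foldl_cons, stepA]
      split
      · simp only [List.nil_append]
        rw [ih ([PySem.Chars.join ['.', ' '] (cur ++ [a]) ++ ['.'], []]) [],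
          ih (acc ++ [PySem.Chars.join ['.', ' '] (cur ++ [a]) ++ ['.'], []]) []]
        simp
      · exact ih acc (cur ++ [a])

theorem finishA_append (x : List (List Char)) (st : List (List Char) × List (List Char)) :
    finishA (x ++ st.1, st.2) = x ++ finishA st := by
  unfold finishA
  split <;> simp

theorem FA_cons (a b : List Char) (rest : List (List Char)) :
    FA (a :: b :: rest) =
      [PySem.Chars.join ['.', ' '] [a, b] ++ ['.'], []] ++ FA rest := by
  unfold FA
  have h1 : (a :: b :: rest).foldl stepA ([], []) =
      rest.foldl stepA ([PySem.Chars.join ['.', ' '] [a, b] ++ ['.'], []], []) := by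
    simp [stepA]
  rw [h1, foldl_stepA_acc rest]
  exact finishA_append _ _

theorem FA_one (a : List Char) : FA [a] = [a ++ ['.']] := by
  simp [FA, stepA, finishA, PySem.Chars.join_singleton]

theorem pairsChunks_ne_nil (ss : List (List Char)) : pairsChunks ss ≠ [] := by
  unfold pairsChunks
  split <;> simp

-- joined A-list = joined B-list plus a trailing '\n' exactly when the sentence count is even
theorem core (n : Nat) :
    ∀ (ss : List (List Char)), ss.length ≤ n → ss ≠ [] →
      FA ss ≠ [] ∧
      PySem.Chars.join ['\n'] (FA ss) =
        PySem.Chars.join ['\n', '\n'] (pairsChunks ss) ++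
          (if ss.length % 2 = 0 then ['\n'] else []) := by
  induction n with
  | zero => intro ss hlen hne; cases ss with
      | nil => exact absurd rfl hne
      | cons a t => simp at hlen
  | succ n ih =>
      intro ss hlen hne
      match ss with
      | [a] =>
          rw [FA_one]
          refine ⟨by simp, ?_⟩
          have hp : pairsChunks [a] = [PySem.Chars.join ['.', ' '] [a] ++ ['.']] := rfl
          rw [hp]
          simp [PySem.Chars.join_singleton]
      | [a, b] =>
          have hFA : FA [a, b] = [PySem.Chars.join ['.', ' '] [a, b] ++ ['.'], []] := by
            rw [FA_cons]; simp [FA, finishA]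
          rw [hFA]
          refine ⟨by simp, ?_⟩
          have hp : pairsChunks [a, b] = [PySem.Chars.join ['.', ' '] [a, b] ++ ['.']] := rfl
          rw [hp]
          rw [PySem.Chars.join_cons_cons, PySem.Chars.join_singleton, PySem.Chars.join_singleton]
          simp
      | a :: b :: c :: rest =>
          have hlen' : (c :: rest).length ≤ n := by
            simp at hlen ⊢; omega
          obtain ⟨hne', hIH⟩ := ih (c :: rest) hlen' (by simp)
          rw [FA_cons]
          obtain ⟨l0, ls, hFA⟩ := List.exists_cons_of_ne_nil hne'
          obtain ⟨p0, ps, hP⟩ := List.exists_cons_of_ne_nil (pairsChunks_ne_nil (c :: rest))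
          constructor
          · simp
          · have hpar : (a :: b :: c :: rest).length % 2 = (c :: rest).length % 2 := by
              simp; omega
            rw [hpar]
            have hpc : pairsChunks (a :: b :: c :: rest) =
                (PySem.Chars.join ['.', ' '] [a, b] ++ ['.']) :: pairsChunks (c :: rest) := rfl
            rw [hpc, hFA, hP]
            rw [hFA, hP] at hIH
            simp only [List.cons_append, List.nil_append]
            rw [PySem.Chars.join_cons_cons, PySem.Chars.join_cons_cons,
              PySem.Chars.join_cons_cons, hIH]
            rw [PySem.Chars.join_cons_cons]
            simp
      | [] => exact absurd rfl hne

theorem strip_append_nl (x : List Char) :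
    PySem.Chars.strip (x ++ ['\n']) = PySem.Chars.strip x := by
  unfold PySem.Chars.strip PySem.Chars.lstrip PySem.Chars.rstrip
  rw [List.dropWhile_append]
  have hn : PySem.Chars.isspace '\n' = true := by decide
  split
  · rename_i h
    simp_all [List.dropWhile]
    intro y hy
    exact h y ((List.dropWhile_sublist (p := PySem.Chars.isspace)).subset hy)
  · simp [List.reverse_append, hn]

-- ===== VERDICT (by name: the statement is the Claim_ definition above) =====
theorem apply_formatting_spec : Claim_equal_apply_formatting := by
  intro text _
  unfold Spec_apply_formatting apply_formatting apply_formatting_alt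
  set ss := PySem.Chars.splitOn text.toList ['.', ' '] with hss
  obtain ⟨-, hjoin⟩ := core ss.length ss le_rfl (splitOn_ne_nil _ _)
  show String.ofList (PySem.Chars.strip (PySem.Chars.join ['\n'] (FA ss))) = _
  rw [hjoin]
  split
  · rw [strip_append_nl]
  · simp
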